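-- pv_equiv track=rewrite | github.com/scottpeterson/d3-bball-npi | myapp/conf_tournaments.py | get_tournament_round_sizes
-- ===== SOURCE A (Python) =====
-- from typing import Dict, List, Set, Tuple
--
-- def get_tournament_round_sizes(total_teams: int, byes: int) -> List[int]:
--     """
--     Calculate number of teams in each round of tournament.
--
--     Args:
--         total_teams: Total teams in tournament
--         byes: Number of first round byes
--
--     Returns:
--         List of integers representing teams per round, from first round to championship
--     """
--     first_round_teams = total_teams - byes
--     if first_round_teams % 2 != 0:
--         raise ValueError("First round teams must be even number")
--
--     sizes = []
--     remaining = first_round_teams // 2 + byes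
--     while remaining > 1:
--         sizes.append(remaining)
--         remaining = remaining // 2
--     sizes.append(2)  # Championship game
--     return sizes
-- ===== SOURCE B (Python) =====
-- def get_tournament_round_sizes(total_teams: int, byes: int):
--     first_round_teams = total_teams - byes
--     if first_round_teams % 2 != 0:
--         raise ValueError("First round teams must be even number")
--     remaining = first_round_teams // 2 + byes
--     if remaining < 2:
--         return [2]
--     # Round sizes are exactly the values of the binary prefixes of `remaining`
--     # (prefix of length L = remaining itself, ..., prefix of length 2), then the
--     # championship game of 2.
--     bits = bin(remaining)[2:]
--     return [int(bits[:i], 2) for i in range(len(bits), 1, -1)] + [2]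
-- ===== Notes on version B (the rewrite author's own statement) =====
-- stated objective: alternative
-- what changed: Instead of a stateful while-loop that repeatedly floor-halves an accumulator, B converts the post-bye count to its binary string once and reads each round size off as the integer value of a binary prefix (prefix lengths len..2), then appends the championship 2.
import Mathlib
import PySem

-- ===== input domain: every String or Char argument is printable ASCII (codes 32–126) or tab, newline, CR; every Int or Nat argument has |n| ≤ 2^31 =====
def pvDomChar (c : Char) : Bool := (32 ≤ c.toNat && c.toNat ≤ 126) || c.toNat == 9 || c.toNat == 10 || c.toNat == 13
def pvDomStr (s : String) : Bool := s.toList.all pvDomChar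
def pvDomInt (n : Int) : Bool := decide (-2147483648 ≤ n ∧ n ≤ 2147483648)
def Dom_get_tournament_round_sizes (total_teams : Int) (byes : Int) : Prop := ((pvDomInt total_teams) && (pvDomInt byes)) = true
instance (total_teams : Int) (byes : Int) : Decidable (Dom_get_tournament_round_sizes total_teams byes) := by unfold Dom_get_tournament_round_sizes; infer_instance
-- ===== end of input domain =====

-- B replaces A's stateful while-halving loop by reading the round sizes off the binary
-- representation of the initial value: each round size is the value of a binary prefix
-- (objective: alternative).

-- ===== PORT A =====
-- the 'while remaining > 1' loop of A; each iteration appends remaining and floor-halves it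
def pvALoop (remaining : Int) : List Int :=
  if _h : remaining > 1 then remaining :: pvALoop (PySem.Int.floordiv remaining 2)
  else [2]
termination_by remaining.toNat
decreasing_by
  rw [PySem.Int.floordiv_eq_ediv_of_pos (by omega)]
  omega

def get_tournament_round_sizes (total_teams : Int) (byes : Int) : List Int :=
  let first_round_teams := total_teams - byes
  if PySem.Int.mod first_round_teams 2 ≠ 0 then []  -- Python raises ValueError here; excluded by Pre_
  else pvALoop (PySem.Int.floordiv first_round_teams 2 + byes)

-- ===== PORT B =====
-- bin(n)[2:] as a list of bits, most significant first (hand port of Python's bin; exact for n ≥ 1)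
def pvBits (n : Nat) : List Bool :=
  if _h : n = 0 then [] else pvBits (n / 2) ++ [n % 2 == 1]
termination_by n
decreasing_by exact Nat.div_lt_self (by omega) (by norm_num)

-- int(bits, 2): value of a big-endian bit string
def pvVal (bs : List Bool) : Int :=
  bs.foldl (fun a b => 2 * a + (if b then 1 else 0)) 0

-- range(L, 1, -1) over Nat indices: [L, L-1, ..., 2] (hand port; exact)
def pvDown : Nat → List Nat
  | 0 => []
  | 1 => []
  | n + 2 => (n + 2) :: pvDown (n + 1)

def get_tournament_round_sizes_alt (total_teams : Int) (byes : Int) : List Int :=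
  let first_round_teams := total_teams - byes
  if PySem.Int.mod first_round_teams 2 ≠ 0 then []  -- Python raises ValueError here; excluded by Pre_
  else
    let remaining := PySem.Int.floordiv first_round_teams 2 + byes
    if remaining < 2 then [2]
    else
      let bits := pvBits remaining.toNat
      ((pvDown bits.length).map (fun i => pvVal (bits.take i))) ++ [2]

-- ===== PRECONDITION & SPEC =====
-- Pre_ excludes exactly the inputs where total_teams - byes is odd: Python A raises ValueError there.
def Pre_get_tournament_round_sizes (total_teams : Int) (byes : Int) : Prop :=
  PySem.Int.mod (total_teams - byes) 2 = 0
instance (total_teams : Int) (byes : Int) : Decidable (Pre_get_tournament_round_sizes total_teams byes) := by unfold Pre_get_tournament_round_sizes; infer_instance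

def pvWitness_get_tournament_round_sizes : Int × Int := (6, 2)

def Spec_get_tournament_round_sizes (total_teams : Int) (byes : Int) (out : List Int) : Prop := out = get_tournament_round_sizes_alt total_teams byes
instance (total_teams : Int) (byes : Int) (out : List Int) : Decidable (Spec_get_tournament_round_sizes total_teams byes out) := by unfold Spec_get_tournament_round_sizes; infer_instance

-- ===== CLAIM (what is proved, stated in full; the proofs are below) =====
def Claim_equal_get_tournament_round_sizes : Prop := ∀ (total_teams : Int) (byes : Int), Dom_get_tournament_round_sizes total_teams byes → Pre_get_tournament_round_sizes total_teams byes → Spec_get_tournament_round_sizes total_teams byes (get_tournament_round_sizes total_teams byes)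

-- ===== LEMMAS AND PROOFS =====

theorem pvVal_append_bit (xs : List Bool) (b : Bool) :
    pvVal (xs ++ [b]) = 2 * pvVal xs + (if b then 1 else 0) := by
  simp [pvVal, List.foldl_append]

theorem pvVal_bits (n : Nat) : pvVal (pvBits n) = (n : Int) := by
  rw [pvBits]
  by_cases h : n = 0
  · simp [h, pvVal]
  · rw [dif_neg h, pvVal_append_bit, pvVal_bits (n / 2)]
    have h2 : n % 2 < 2 := Nat.mod_lt _ (by norm_num)
    have h3 : n = 2 * (n / 2) + n % 2 := (Nat.div_add_mod' n 2).symm ▸ by omega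
    by_cases hb : n % 2 = 1
    · simp [hb]; omega
    · have : n % 2 = 0 := by omega
      simp [this]; omega
termination_by n
decreasing_by exact Nat.div_lt_self (by omega) (by norm_num)

theorem pvBits_len_pos (n : Nat) (h : n ≠ 0) : 1 ≤ (pvBits n).length := by
  rw [pvBits, dif_neg h]; simp

theorem pvDown_mem_le (n : Nat) (i : Nat) (h : i ∈ pvDown n) : i ≤ n := by
  match n with
  | 0 => simp [pvDown] at h
  | 1 => simp [pvDown] at h
  | m + 2 =>
    rw [pvDown] at h
    rcases List.mem_cons.mp h with h1 | h1
    · omega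
    · have := pvDown_mem_le (m + 1) i h1; omega

theorem pvDown_succ (n : Nat) (h : 1 ≤ n) : pvDown (n + 1) = (n + 1) :: pvDown n := by
  match n, h with
  | m + 1, _ => rfl

-- A's halving loop produces exactly the binary-prefix values that B reads off, plus [2].
theorem pv_loop_eq (r : Int) :
    pvALoop r =
      ((pvDown (pvBits r.toNat).length).map (fun i => pvVal ((pvBits r.toNat).take i))) ++ [2] := by
  rw [pvALoop]
  by_cases h2 : r > 1
  · rw [dif_pos h2]
    have hfd : PySem.Int.floordiv r 2 = r / 2 :=
      PySem.Int.floordiv_eq_ediv_of_pos (by norm_num)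
    have hhalf : (PySem.Int.floordiv r 2).toNat = r.toNat / 2 := by
      rw [hfd]; omega
    have hIH := pv_loop_eq (PySem.Int.floordiv r 2)
    rw [hhalf] at hIH
    have hne : r.toNat ≠ 0 := by omega
    have hbits : pvBits r.toNat = pvBits (r.toNat / 2) ++ [r.toNat % 2 == 1] := by
      rw [pvBits, dif_neg hne]
    have hne' : r.toNat / 2 ≠ 0 := by omega
    have hL' : 1 ≤ (pvBits (r.toNat / 2)).length := pvBits_len_pos _ hne'
    have hlen : (pvBits r.toNat).length = (pvBits (r.toNat / 2)).length + 1 := by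
      rw [hbits]; simp
    rw [hlen, pvDown_succ _ hL', List.map_cons]
    have hhead : pvVal ((pvBits r.toNat).take ((pvBits (r.toNat / 2)).length + 1)) = r := by
      rw [← hlen, List.take_length, pvVal_bits]; omega
    have htail :
        (pvDown (pvBits (r.toNat / 2)).length).map
            (fun i => pvVal ((pvBits r.toNat).take i)) =
          (pvDown (pvBits (r.toNat / 2)).length).map
            (fun i => pvVal ((pvBits (r.toNat / 2)).take i)) := by
      apply List.map_congr_left
      intro i hi
      have hle : i ≤ (pvBits (r.toNat / 2)).length := pvDown_mem_le _ _ hi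
      rw [hbits, List.take_append_of_le_length hle]
    rw [hhead, htail, hIH]
    simp
  · rw [dif_neg h2]
    have hle : r.toNat ≤ 1 := by omega
    have : (pvBits r.toNat).length ≤ 1 := by
      match hn : r.toNat, hle with
      | 0, _ => simp [pvBits]
      | 1, _ => simp [pvBits]
    match hm : (pvBits r.toNat).length, this with
    | 0, _ => simp [pvDown]
    | 1, _ => simp [pvDown]
termination_by r.toNat
decreasing_by
  rw [PySem.Int.floordiv_eq_ediv_of_pos (by omega)]
  omega

-- ===== VERDICT (by name: the statement is the Claim_ definition above) =====
theorem get_tournament_round_sizes_spec : Claim_equal_get_tournament_round_sizes := by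
  intro t b _ _
  unfold Spec_get_tournament_round_sizes
  simp only [get_tournament_round_sizes, get_tournament_round_sizes_alt]
  by_cases h : PySem.Int.mod (t - b) 2 ≠ 0
  · rw [if_pos h, if_pos h]
  · rw [if_neg h, if_neg h]
    set r := PySem.Int.floordiv (t - b) 2 + b with hr
    by_cases hlt : r < 2
    · rw [if_pos hlt, pvALoop, dif_neg (by omega)]
    · rw [if_neg hlt]
      exact pv_loop_eq r
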